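-- pv_equiv track=rewrite | github.com/dongfeng3692/SheetGo | python/validation/reference_check.py | is_aggregate_function
-- ===== SOURCE A (Python) =====
-- _AGGREGATE_FUNCTIONS = frozenset({
--     "SUM", "AVERAGE", "COUNT", "COUNTA", "COUNTBLANK",
--     "MAX", "MIN", "PRODUCT", "STDEV", "STDEVP",
--     "VAR", "VARP", "MEDIAN", "MODE",
-- })
--
-- def is_aggregate_function(formula: str) -> bool:
--     """判断公式最外层是否为聚合函数"""
--     if not formula or not formula.startswith("="):
--         return False
--     stripped = formula[1:].strip()
--     for func in _AGGREGATE_FUNCTIONS: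
--         if stripped.upper().startswith(func + "("):
--             return True
--     return False
-- ===== SOURCE B (Python) =====
-- _AGGREGATE_FUNCTIONS = frozenset({
--     "SUM", "AVERAGE", "COUNT", "COUNTA", "COUNTBLANK",
--     "MAX", "MIN", "PRODUCT", "STDEV", "STDEVP",
--     "VAR", "VARP", "MEDIAN", "MODE",
-- })
--
-- def is_aggregate_function(formula: str) -> bool:
--     """判断公式最外层是否为聚合函数"""
--     if not formula or not formula.startswith("="):
--         return False
--     i, n = 1, len(formula)
--     while i < n and formula[i].isspace():
--         i += 1
--     name = ""
--     while i < n and formula[i] != "(":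
--         name += formula[i].upper()
--         i += 1
--     return i < n and name in _AGGREGATE_FUNCTIONS
-- ===== Notes on version B (the rewrite author's own statement) =====
-- stated objective: alternative
-- what changed: B replaces A's strip/upper plus a scan of all 14 aggregate names with startswith(name + '(') by a single hand-written left-to-right scan: skip '=', skip leading whitespace, accumulate the upper-cased token until the first '(', then one set-membership test.
import Mathlib
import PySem

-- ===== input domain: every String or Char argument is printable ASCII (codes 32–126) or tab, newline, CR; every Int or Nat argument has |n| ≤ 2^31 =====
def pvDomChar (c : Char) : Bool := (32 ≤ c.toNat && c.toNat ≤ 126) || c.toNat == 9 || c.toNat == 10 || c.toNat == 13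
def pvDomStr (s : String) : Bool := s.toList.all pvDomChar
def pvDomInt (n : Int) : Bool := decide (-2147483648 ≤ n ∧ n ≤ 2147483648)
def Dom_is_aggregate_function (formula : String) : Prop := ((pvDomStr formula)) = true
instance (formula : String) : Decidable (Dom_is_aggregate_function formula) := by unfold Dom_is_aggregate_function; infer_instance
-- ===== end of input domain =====

-- B replaces A's strip/upper + scan of 14 startswith(name+'(') tests by a single left-to-right
-- scanner (skip '=', skip whitespace, collect the upper-cased token until '(') and one membership test.


-- ===== PORT A =====
def aggFuncs : List (List Char) :=
  ["SUM".toList, "AVERAGE".toList, "COUNT".toList, "COUNTA".toList, "COUNTBLANK".toList,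
   "MAX".toList, "MIN".toList, "PRODUCT".toList, "STDEV".toList, "STDEVP".toList,
   "VAR".toList, "VARP".toList, "MEDIAN".toList, "MODE".toList]

def is_aggregate_function (formula : String) : Bool :=
  let cs := formula.toList
  if cs.isEmpty || !(PySem.Chars.startswith cs "=".toList) then false
  else
    let stripped := PySem.Chars.strip (PySem.List.slice cs (some 1) none)
    aggFuncs.any (fun f => PySem.Chars.startswith (PySem.Chars.upper stripped) (f ++ ['(']))

-- ===== PORT B =====
-- Source B's first while loop: advance the cursor past leading whitespace (formula[i].isspace())
def pvSkipSpace : List Char → List Char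
  | [] => []
  | c :: cs => if PySem.Chars.isspace c then pvSkipSpace cs else c :: cs

-- Source B's second while loop: accumulate the upper-cased token until the first '(';
-- none = the loop ran off the end of the string (i = n, no '(' was found)
def pvScanName : List Char → Option (List Char)
  | [] => none
  | c :: cs => if c = '(' then some [] else (pvScanName cs).map (PySem.Chars.upperChar c :: ·)

def is_aggregate_function_alt (formula : String) : Bool :=
  let cs := formula.toList
  if cs.isEmpty || !(PySem.Chars.startswith cs "=".toList) then false
  else
    match pvScanName (pvSkipSpace (cs.drop 1)) with
    | some name => aggFuncs.contains name
    | none => false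

-- ===== PRECONDITION & SPEC =====
def Spec_is_aggregate_function (formula : String) (out : Bool) : Prop := out = is_aggregate_function_alt formula
instance (formula : String) (out : Bool) : Decidable (Spec_is_aggregate_function formula out) := by unfold Spec_is_aggregate_function; infer_instance

-- ===== CLAIM (what is proved, stated in full; the proofs are below) =====
def Claim_equal_is_aggregate_function : Prop := ∀ (formula : String), Dom_is_aggregate_function formula → Spec_is_aggregate_function formula (is_aggregate_function formula)

-- ===== LEMMAS AND PROOFS =====

-- ASCII-table fact: upper-casing a character yields '(' only for '(' itself
lemma upperChar_paren (c : Char) : (PySem.Chars.upperChar c = '(') ↔ c = '(' := by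
  unfold PySem.Chars.upperChar PySem.Chars.islower
  split_ifs with hl
  · simp only [Bool.and_eq_true, decide_eq_true_eq, Char.le_def] at hl
    have h1 : (97:Nat) ≤ c.toNat := hl.1
    have h2 : c.toNat ≤ 122 := hl.2
    constructor
    · intro h
      exfalso
      have hv : Nat.isValidChar (c.toNat - 32) := by left; omega
      have h' := congrArg Char.toNat h
      rw [Char.toNat_ofNat, if_pos hv] at h'
      have : c.toNat - 32 = 40 := h'
      omega
    · intro h; subst h; simp at h1
  · constructor <;> (intro h; exact h)

lemma skipSpace_eq_lstrip (cs : List Char) : pvSkipSpace cs = PySem.Chars.lstrip cs := by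
  induction cs with
  | nil => rfl
  | cons c cs ih =>
      show (if PySem.Chars.isspace c then pvSkipSpace cs else c :: cs) = _
      by_cases h : PySem.Chars.isspace c
      · simp [h, ih, PySem.Chars.lstrip]
      · simp [h, PySem.Chars.lstrip]

-- the scanner returns the upper-cased token before the first '(' (none if there is no '(')
lemma scanName_eq (u : List Char) :
    pvScanName u =
      if '(' ∈ u then some ((u.takeWhile (fun c => c != '(')).map PySem.Chars.upperChar)
      else none := by
  induction u with
  | nil => rfl
  | cons c cs ih =>
      show (if c = '(' then some [] else (pvScanName cs).map (PySem.Chars.upperChar c :: ·)) = _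
      by_cases hc : c = '('
      · simp [hc]
      · simp only [hc, if_false, ih]
        have hnc : ¬ '(' = c := fun hh => hc hh.symm
        by_cases h : '(' ∈ cs
        · simp [h, hc]
        · simp [h, hnc]

-- the prefix before the first '(' of f ++ '(' :: t is f, when f itself has no '('
lemma takeWhile_append_paren (f t : List Char) (hf : '(' ∉ f) :
    (f ++ '(' :: t).takeWhile (fun c => c != '(') = f := by
  induction f with
  | nil => simp
  | cons a f ih =>
      have ha : a ≠ '(' := by intro h; exact hf (h ▸ List.mem_cons_self)
      have hf' : '(' ∉ f := fun h => hf (List.mem_cons_of_mem _ h)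
      simp [ha, ih hf']

-- partition at '(' : if '(' occurs in u then u splits as head ++ '(' :: rest
lemma partition_paren (u : List Char) (h : '(' ∈ u) :
    u = u.takeWhile (fun c => c != '(') ++ '(' :: (u.dropWhile (fun c => c != '(')).tail := by
  induction u with
  | nil => cases h
  | cons a u ih =>
      by_cases ha : a = '('
      · subst ha; simp
      · have h' : '(' ∈ u := by
          rcases List.mem_cons.mp h with h₁ | h₁
          · exact absurd h₁.symm ha
          · exact h₁
        simpa [List.takeWhile_cons, List.dropWhile_cons, ha] using ih h'

-- one name: startswith (f ++ "(") u equals "'(' occurs and the chars before it are f"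
lemma startswith_paren (u f : List Char) (hf : '(' ∉ f) :
    PySem.Chars.startswith u (f ++ ['(']) =
      (u.contains '(' && (u.takeWhile (fun c => c != '(') == f)) := by
  rw [Bool.eq_iff_iff]
  simp only [PySem.Chars.startswith_iff, Bool.and_eq_true, List.contains_eq_mem,
    decide_eq_true_eq, beq_iff_eq]
  constructor
  · rintro ⟨t, rfl⟩
    refine ⟨by simp, ?_⟩
    simpa using takeWhile_append_paren f t hf
  · rintro ⟨hmem, hhead⟩
    refine ⟨(u.dropWhile (fun c => c != '(')).tail, ?_⟩
    conv_rhs => rw [partition_paren u hmem]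
    rw [hhead]
    simp

-- A's whole scan: any-of-14-prefix-tests = "'(' occurs and the head is one of the names"
lemma core_eq (u : List Char) :
    aggFuncs.any (fun f => PySem.Chars.startswith u (f ++ ['('])) =
      (u.contains '(' && aggFuncs.contains (u.takeWhile (fun c => c != '('))) := by
  have hnop : ∀ f ∈ aggFuncs, '(' ∉ f := by decide
  rw [Bool.eq_iff_iff]
  simp only [List.any_eq_true, Bool.and_eq_true, List.contains_eq_mem, decide_eq_true_eq]
  constructor
  · rintro ⟨f, hfmem, hsw⟩
    rw [startswith_paren u f (hnop f hfmem)] at hsw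
    simp only [Bool.and_eq_true, List.contains_eq_mem, decide_eq_true_eq, beq_iff_eq] at hsw
    exact ⟨hsw.1, hsw.2 ▸ hfmem⟩
  · rintro ⟨hmem, hin⟩
    refine ⟨_, hin, ?_⟩
    rw [startswith_paren u _ (hnop _ hin)]
    simp [hmem]

-- rstrip only removes a whitespace suffix
lemma rstrip_append (v : List Char) :
    PySem.Chars.rstrip v ++ (v.reverse.takeWhile PySem.Chars.isspace).reverse = v := by
  show (v.reverse.dropWhile PySem.Chars.isspace).reverse ++ _ = v
  rw [← List.reverse_append, List.takeWhile_append_dropWhile, List.reverse_reverse]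

lemma paren_not_space : PySem.Chars.isspace '(' = false := by decide

lemma paren_mem_rstrip (v : List Char) : '(' ∈ PySem.Chars.rstrip v ↔ '(' ∈ v := by
  have hsplit := rstrip_append v
  constructor
  · intro h; rw [← hsplit]; exact List.mem_append.mpr (Or.inl h)
  · intro h
    rw [← hsplit] at h
    rcases List.mem_append.mp h with h1 | h1
    · exact h1
    · exact absurd (List.mem_takeWhile_imp (List.mem_reverse.mp h1)) (by simp [paren_not_space])

-- takeWhile ignores everything after an element falsifying the predicate
lemma takeWhile_append_of_mem {p : Char → Bool} (a b : List Char) (x : Char)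
    (hx : x ∈ a) (hpx : p x = false) : (a ++ b).takeWhile p = a.takeWhile p := by
  induction a with
  | nil => cases hx
  | cons c a ih =>
      by_cases hpc : p c = true
      · rcases List.mem_cons.mp hx with rfl | hx'
        · rw [hpc] at hpx; cases hpx
        · simp [hpc, ih hx']
      · simp [hpc]

lemma takeWhile_rstrip (v : List Char) (h : '(' ∈ PySem.Chars.rstrip v) :
    v.takeWhile (fun c => c != '(') = (PySem.Chars.rstrip v).takeWhile (fun c => c != '(') := by
  conv_lhs => rw [← rstrip_append v]
  exact takeWhile_append_of_mem _ _ '(' h (by simp)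

-- upper-casing commutes with splitting at '('
lemma takeWhile_map_upper (s : List Char) :
    (s.map PySem.Chars.upperChar).takeWhile (fun c => c != '(') =
      (s.takeWhile (fun c => c != '(')).map PySem.Chars.upperChar := by
  rw [List.takeWhile_map]
  have hp : ((fun c => c != '(') ∘ PySem.Chars.upperChar) = fun c : Char => c != '(' := by
    funext c
    by_cases hc : c = '('
    · subst hc
      simp [(upperChar_paren '(').mpr rfl]
    · have hu : PySem.Chars.upperChar c ≠ '(' := fun h => hc ((upperChar_paren c).mp h)
      have h1 : (PySem.Chars.upperChar c != '(') = true := by simp [hu]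
      have h2 : (c != '(') = true := by simp [hc]
      show (PySem.Chars.upperChar c != '(') = (c != '(')
      rw [h1, h2]
  rw [hp]

lemma mem_map_upper (s : List Char) : '(' ∈ s.map PySem.Chars.upperChar ↔ '(' ∈ s := by
  simp only [List.mem_map]
  constructor
  · rintro ⟨c, hc, h⟩; exact ((upperChar_paren c).mp h) ▸ hc
  · intro h; exact ⟨'(', h, (upperChar_paren '(').mpr rfl⟩

-- the heart: A's scan over the fully stripped+uppered tail = B's scanner after the leading skip
lemma main_eq (rest : List Char) :
    aggFuncs.any (fun f =>
        PySem.Chars.startswith (PySem.Chars.upper (PySem.Chars.strip rest)) (f ++ ['('])) =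
      (match pvScanName (pvSkipSpace rest) with
       | some name => aggFuncs.contains name
       | none => false) := by
  rw [skipSpace_eq_lstrip, scanName_eq]
  have hstrip : PySem.Chars.strip rest = PySem.Chars.rstrip (PySem.Chars.lstrip rest) := rfl
  have hup : ∀ t : List Char, PySem.Chars.upper t = t.map PySem.Chars.upperChar := fun t => rfl
  rw [hstrip, hup, core_eq]
  set v := PySem.Chars.lstrip rest with hv
  set s := PySem.Chars.rstrip v with hs
  by_cases h : '(' ∈ v
  · have hsmem : '(' ∈ s := (paren_mem_rstrip v).mpr h
    have hcont : (s.map PySem.Chars.upperChar).contains '(' = true := by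
      simp [List.contains_eq_mem, (mem_map_upper s).mpr hsmem]
    rw [hcont, takeWhile_map_upper, ← takeWhile_rstrip v hsmem]
    simp only [h, if_true, Bool.true_and]
  · have hsmem : '(' ∉ s := fun hc => h ((paren_mem_rstrip v).mp hc)
    have hcont : (s.map PySem.Chars.upperChar).contains '(' = false := by
      simp [List.contains_eq_mem, (mem_map_upper s).not.mpr hsmem]
    rw [hcont]
    simp [h]

-- ===== VERDICT (by name: the statement is the Claim_ definition above) =====
theorem is_aggregate_function_spec : Claim_equal_is_aggregate_function := by
  intro formula _
  unfold Spec_is_aggregate_function is_aggregate_function is_aggregate_function_alt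
  simp only
  by_cases hg : (formula.toList.isEmpty || !(PySem.Chars.startswith formula.toList "=".toList)) = true
  · rw [if_pos hg, if_pos hg]
  · rw [if_neg hg, if_neg hg]
    have hslice : PySem.List.slice formula.toList (some 1) none = formula.toList.drop 1 := by
      rw [PySem.List.slice_from]
      · norm_num
      · norm_num
    rw [hslice]
    exact main_eq (formula.toList.drop 1)
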